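-- pv_equiv track=rewrite | github.com/lynxoskar/lakepipe | lakepipe/transforms/duckdb_processor.py | _convert_polars_to_sql_expr
-- ===== SOURCE A (Python) =====
-- def _convert_polars_to_sql_expr(expr: str) -> str:
--     """Convert Polars-style expressions to SQL"""
--     # Handle common Polars functions that need conversion to SQL
--     conversions = {
--         "extract('date'": "DATE(",
--         "extract('hour'": "HOUR(",
--         "extract('minute'": "MINUTE(",
--         "extract('dayofweek'": "DAYOFWEEK(",
--         "extract('epoch'": "EPOCH(",
--         "current_timestamp()": "CURRENT_TIMESTAMP",
--         "current_date()": "CURRENT_DATE",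
--     }
--
--     sql_expr = expr
--     for polars_func, sql_func in conversions.items():
--         if polars_func in sql_expr:
--             # Handle parentheses correctly
--             if polars_func.endswith("(") and not sql_func.endswith("("):
--                 sql_expr = sql_expr.replace(polars_func, sql_func + "(")
--             else:
--                 sql_expr = sql_expr.replace(polars_func, sql_func)
--
--     return sql_expr
-- ===== SOURCE B (Python) =====
-- def _convert_polars_to_sql_expr(expr: str) -> str:
--     """Convert Polars-style expressions to SQL (single left-to-right pass)."""
--     conversions = {
--         "extract('date'": "DATE(",
--         "extract('hour'": "HOUR(",
--         "extract('minute'": "MINUTE(",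
--         "extract('dayofweek'": "DAYOFWEEK(",
--         "extract('epoch'": "EPOCH(",
--         "current_timestamp()": "CURRENT_TIMESTAMP",
--         "current_date()": "CURRENT_DATE",
--     }
--
--     out = []
--     i = 0
--     n = len(expr)
--     while i < n:
--         for polars_func, sql_func in conversions.items():
--             if expr.startswith(polars_func, i):
--                 out.append(sql_func)
--                 i += len(polars_func)
--                 break
--         else:
--             out.append(expr[i])
--             i += 1
--     return "".join(out)
-- ===== Notes on version B (the rewrite author's own statement) =====
-- stated objective: alternative
-- what changed: A makes seven sequential full-string str.replace passes (one per conversion key, each rescanning the whole string); B builds the result in one left-to-right pass that tries the conversion keys in dict order at each position and emits the replacement or the current character.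
import Mathlib
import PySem

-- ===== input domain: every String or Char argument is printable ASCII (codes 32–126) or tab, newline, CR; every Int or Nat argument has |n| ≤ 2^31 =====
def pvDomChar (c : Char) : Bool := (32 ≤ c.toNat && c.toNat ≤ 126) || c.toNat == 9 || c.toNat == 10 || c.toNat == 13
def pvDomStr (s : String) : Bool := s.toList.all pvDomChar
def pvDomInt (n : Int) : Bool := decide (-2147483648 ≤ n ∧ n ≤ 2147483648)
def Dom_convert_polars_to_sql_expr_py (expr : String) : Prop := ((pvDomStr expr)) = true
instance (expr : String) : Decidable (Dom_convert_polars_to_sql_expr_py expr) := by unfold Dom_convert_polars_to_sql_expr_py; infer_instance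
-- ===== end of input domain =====

-- B replaces A's seven sequential full-string replace passes by one left-to-right scan that
-- tries the conversion keys (in dict order) at each position; alternative decomposition, same cost.

-- ===== PORT A =====
-- the `conversions` dict of A (insertion order preserved)
def pvConversionsA : PySem.Dict String String := PySem.Dict.mk
  [("extract('date'", "DATE("),
   ("extract('hour'", "HOUR("),
   ("extract('minute'", "MINUTE("),
   ("extract('dayofweek'", "DAYOFWEEK("),
   ("extract('epoch'", "EPOCH("),
   ("current_timestamp()", "CURRENT_TIMESTAMP"),
   ("current_date()", "CURRENT_DATE")]

def convert_polars_to_sql_expr_py (expr : String) : String :=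
  -- for polars_func, sql_func in conversions.items(): …
  pvConversionsA.items.foldl (fun sql_expr kv =>
    if PySem.Str.isIn kv.1 sql_expr then
      if PySem.Str.endswith kv.1 "(" && !(PySem.Str.endswith kv.2 "(") then
        PySem.Str.replace sql_expr kv.1 (kv.2 ++ "(")
      else
        PySem.Str.replace sql_expr kv.1 kv.2
    else sql_expr) expr

-- ===== PORT B =====
-- conversions.items() of Source B as an association list over char lists
def pvConversionsB : List (List Char × List Char) :=
  [("extract('date'".toList, "DATE(".toList),
   ("extract('hour'".toList, "HOUR(".toList),
   ("extract('minute'".toList, "MINUTE(".toList),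
   ("extract('dayofweek'".toList, "DAYOFWEEK(".toList),
   ("extract('epoch'".toList, "EPOCH(".toList),
   ("current_timestamp()".toList, "CURRENT_TIMESTAMP".toList),
   ("current_date()".toList, "CURRENT_DATE".toList)]

-- Source B's inner `for … if expr.startswith(k, i): … break / else:` — first key matching at the
-- current position (the `!k.isEmpty` conjunct is a totality guard only: every key is nonempty)
def pvFindMatch (ps : List (List Char × List Char)) (s : List Char) :
    Option (List Char × List Char) :=
  match ps with
  | [] => none
  | (k, v) :: rest => if !k.isEmpty && k.isPrefixOf s then some (k, v) else pvFindMatch rest s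

theorem pvFindMatch_pos {ps : List (List Char × List Char)} {s k v : List Char}
    (h : pvFindMatch ps s = some (k, v)) : 0 < k.length := by
  induction ps with
  | nil => simp [pvFindMatch] at h
  | cons p rest ih =>
    obtain ⟨k', v'⟩ := p
    by_cases hc : (!k'.isEmpty && k'.isPrefixOf s) = true
    · simp [pvFindMatch, hc] at h
      cases k' with
      | nil => simp at hc
      | cons a t => simp [← h.1]
    · simp only [pvFindMatch, hc] at h
      · exact ih (by simpa [hc] using h)

-- Source B's `while i < n` loop, index i rendered as recursion on the remaining suffix of expr
def pvScan (ps : List (List Char × List Char)) : List Char → List Char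
  | [] => []
  | c :: t =>
    match hm : pvFindMatch ps (c :: t) with
    | some (k, v) => v ++ pvScan ps ((c :: t).drop k.length)
    | none => c :: pvScan ps t
termination_by s => s.length
decreasing_by
  · have h1 := pvFindMatch_pos hm
    simp only [List.length_drop, List.length_cons]
    omega
  · simp

def convert_polars_to_sql_expr_py_alt (expr : String) : String :=
  String.ofList (pvScan pvConversionsB expr.toList)

-- ===== PRECONDITION & SPEC =====
def Spec_convert_polars_to_sql_expr_py (expr : String) (out : String) : Prop := out = convert_polars_to_sql_expr_py_alt expr
instance (expr : String) (out : String) : Decidable (Spec_convert_polars_to_sql_expr_py expr out) := by unfold Spec_convert_polars_to_sql_expr_py; infer_instance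

-- ===== CLAIM (what is proved, stated in full; the proofs are below) =====
def Claim_equal_convert_polars_to_sql_expr_py : Prop := ∀ (expr : String), Dom_convert_polars_to_sql_expr_py expr → Spec_convert_polars_to_sql_expr_py expr (convert_polars_to_sql_expr_py expr)

-- ===== LEMMAS AND PROOFS =====

-- clean structural form of Python's str.replace for a nonempty pattern
def pvRepl (old nw : List Char) : List Char → List Char
  | [] => []
  | c :: t =>
    if h : old ≠ [] ∧ old.isPrefixOf (c :: t) then nw ++ pvRepl old nw ((c :: t).drop old.length)
    else c :: pvRepl old nw t
termination_by s => s.length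
decreasing_by
  · have h1 : 0 < old.length := by cases old <;> simp_all
    simp only [List.length_drop, List.length_cons]
    omega
  · simp

theorem pvGo_eq (old nw : List Char) (ho : old ≠ []) :
    ∀ (fuel : Nat) (l acc : List Char), l.length ≤ fuel →
      PySem.Chars.replace.go old nw fuel l acc = acc.reverse ++ pvRepl old nw l := by
  intro fuel
  induction fuel with
  | zero =>
    intro l acc hl
    have : l = [] := by cases l <;> simp_all
    subst this
    simp [PySem.Chars.replace.go, pvRepl]
  | succ n ih =>
    intro l acc hl
    cases l with
    | nil => simp [PySem.Chars.replace.go, pvRepl]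
    | cons c t =>
      by_cases hp : old.isPrefixOf (c :: t)
      · rw [PySem.Chars.replace.go]
        simp only [hp, if_true]
        have hlen : ((c :: t).drop old.length).length ≤ n := by
          have : 0 < old.length := by cases old <;> simp_all
          simp only [List.length_cons] at hl
          simp only [List.length_drop, List.length_cons]
          omega
        rw [ih _ _ hlen]
        rw [pvRepl]
        rw [dif_pos ⟨ho, hp⟩]
        simp
      · rw [PySem.Chars.replace.go]
        simp only [hp]
        have hlen : t.length ≤ n := by simp at hl; omega
        rw [ih _ _ hlen]
        rw [pvRepl, dif_neg (by tauto)]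
        simp

theorem pvReplace_eq (l old nw : List Char) (ho : old ≠ []) :
    PySem.Chars.replace l old nw = pvRepl old nw l := by
  unfold PySem.Chars.replace
  rw [if_neg (by simpa using ho)]
  simpa using pvGo_eq old nw ho l.length l [] le_rfl

theorem pvRepl_not_infix {old : List Char} (nw : List Char) (ho : old ≠ []) :
    ∀ l, ¬ old <:+: l → pvRepl old nw l = l := by
  intro l
  induction l with
  | nil => intro _; rw [pvRepl]
  | cons c t ih =>
    intro h
    rw [pvRepl, dif_neg, ih]
    · intro hinf
      exact h (hinf.trans (List.suffix_cons c t).isInfix)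
    · rintro ⟨-, hp⟩
      exact h (List.isPrefixOf_iff_prefix.mp hp).isInfix

theorem pvRepl_skip {old : List Char} (nw : List Char) {v' : List Char}
    (hd : ∀ c ∈ v', c ∉ old.take 1) : ∀ X, pvRepl old nw (v' ++ X) = v' ++ pvRepl old nw X := by
  induction v' with
  | nil => intro X; simp
  | cons a v'' ih =>
    intro X
    simp only [List.cons_append]
    rw [pvRepl, dif_neg]
    · rw [ih (fun c hc => hd c (List.mem_cons_of_mem _ hc)) X]
    · rintro ⟨hne, hp⟩
      have hp' := List.isPrefixOf_iff_prefix.mp hp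
      cases old with
      | nil => exact hne rfl
      | cons o ot =>
        have hoa : o = a := (List.cons_prefix_cons.mp hp').1
        exact hd a List.mem_cons_self (by simp [hoa])

theorem pvRepl_pos {old : List Char} (nw : List Char) (ho : old ≠ []) {s : List Char}
    (hp : old <+: s) (hs : s ≠ []) :
    pvRepl old nw s = nw ++ pvRepl old nw (s.drop old.length) := by
  cases s with
  | nil => exact absurd rfl hs
  | cons c t => rw [pvRepl, dif_pos ⟨ho, List.isPrefixOf_iff_prefix.mpr hp⟩]

theorem pvRepl_neg {old : List Char} (nw : List Char) {c : Char} {t : List Char}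
    (hp : ¬ old <+: (c :: t)) : pvRepl old nw (c :: t) = c :: pvRepl old nw t := by
  rw [pvRepl, dif_neg]
  rintro ⟨-, hpp⟩
  exact hp (List.isPrefixOf_iff_prefix.mp hpp)

theorem pvFindMatch_mem {ps : List (List Char × List Char)} {s k v : List Char}
    (h : pvFindMatch ps s = some (k, v)) : (k, v) ∈ ps ∧ k ≠ [] ∧ k <+: s := by
  induction ps with
  | nil => simp [pvFindMatch] at h
  | cons p rest ih =>
    obtain ⟨k', v'⟩ := p
    by_cases hc : (!k'.isEmpty && k'.isPrefixOf s) = true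
    · simp only [pvFindMatch, hc, if_true, Option.some.injEq, Prod.mk.injEq] at h
      obtain ⟨h1, h2⟩ := h
      subst h1; subst h2
      simp only [Bool.and_eq_true, Bool.not_eq_true'] at hc
      exact ⟨List.mem_cons_self, by simpa using hc.1, List.isPrefixOf_iff_prefix.mp hc.2⟩
    · simp only [pvFindMatch] at h
      rw [if_neg hc] at h
      obtain ⟨h1, h2, h3⟩ := ih h
      exact ⟨List.mem_cons_of_mem _ h1, h2, h3⟩

theorem pvFindMatch_none_iff {ps : List (List Char × List Char)} {s : List Char} :
    pvFindMatch ps s = none ↔ ∀ p ∈ ps, p.1 = [] ∨ ¬ p.1 <+: s := by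
  induction ps with
  | nil => simp [pvFindMatch]
  | cons p rest ih =>
    obtain ⟨k', v'⟩ := p
    by_cases hc : (!k'.isEmpty && k'.isPrefixOf s) = true
    · simp only [pvFindMatch, hc, if_true]
      constructor
      · intro h; cases h
      · intro h
        simp only [Bool.and_eq_true, Bool.not_eq_true'] at hc
        rcases h (k', v') List.mem_cons_self with h1 | h1
        · exact absurd (by simpa using h1) (by simpa using hc.1)
        · exact absurd (List.isPrefixOf_iff_prefix.mp hc.2) h1
    · simp only [pvFindMatch]
      rw [if_neg hc, ih]
      constructor
      · intro h p hp
        rcases List.mem_cons.mp hp with h1 | h1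
        · subst h1
          simp only [Bool.and_eq_true, Bool.not_eq_true'] at hc
          by_cases hk : k' = []
          · exact Or.inl hk
          · refine Or.inr (fun hpre => hc ⟨?_, List.isPrefixOf_iff_prefix.mpr hpre⟩)
            simpa using hk
        · exact h p h1
      · intro h p hp
        exact h p (List.mem_cons_of_mem _ hp)

theorem pvFindMatch_append_some {ps qs : List (List Char × List Char)} {s : List Char}
    {pr : List Char × List Char} (h : pvFindMatch ps s = some pr) :
    pvFindMatch (ps ++ qs) s = some pr := by
  induction ps with
  | nil => simp [pvFindMatch] at h
  | cons p rest ih =>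
    obtain ⟨k', v'⟩ := p
    by_cases hc : (!k'.isEmpty && k'.isPrefixOf s) = true
    · simp only [pvFindMatch, hc, if_true] at h
      simp only [List.cons_append, pvFindMatch, hc, if_true]
      exact h
    · simp only [pvFindMatch] at h
      rw [if_neg hc] at h
      simp only [List.cons_append, pvFindMatch]
      rw [if_neg hc]
      exact ih h

theorem pvFindMatch_append_none {ps qs : List (List Char × List Char)} {s : List Char}
    (h : pvFindMatch ps s = none) : pvFindMatch (ps ++ qs) s = pvFindMatch qs s := by
  induction ps with
  | nil => simp
  | cons p rest ih =>
    obtain ⟨k', v'⟩ := p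
    by_cases hc : (!k'.isEmpty && k'.isPrefixOf s) = true
    · simp only [pvFindMatch, hc, if_true] at h
      cases h
    · simp only [pvFindMatch] at h
      rw [if_neg hc] at h
      simp only [List.cons_append, pvFindMatch]
      rw [if_neg hc]
      exact ih h

theorem pvScan_nil (ps : List (List Char × List Char)) : pvScan ps [] = [] := by
  rw [pvScan]

theorem pvScan_cons_some {ps : List (List Char × List Char)} {c : Char} {t k v : List Char}
    (hm : pvFindMatch ps (c :: t) = some (k, v)) :
    pvScan ps (c :: t) = v ++ pvScan ps ((c :: t).drop k.length) := by
  rw [pvScan]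
  split
  · rename_i k' v' hm'
    rw [hm] at hm'
    obtain ⟨h1, h2⟩ := Prod.mk.injEq .. ▸ (Option.some.injEq .. ▸ hm')
    subst h1; subst h2; rfl
  · rename_i hm'
    rw [hm] at hm'
    cases hm'

theorem pvScan_cons_none {ps : List (List Char × List Char)} {c : Char} {t : List Char}
    (hm : pvFindMatch ps (c :: t) = none) :
    pvScan ps (c :: t) = c :: pvScan ps t := by
  rw [pvScan]
  split
  · rename_i k' v' hm'
    rw [hm] at hm'
    cases hm'
  · rfl

theorem pvScan_empty : ∀ s : List Char, pvScan [] s = s := by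
  intro s
  induction s with
  | nil => exact pvScan_nil []
  | cons c t ih => rw [pvScan_cons_none (by simp [pvFindMatch]), ih]

-- a prefix of the scan's output whose chars avoid every replacement text is a prefix of the input
theorem pvScan_prefix_rev {ps : List (List Char × List Char)}
    (hv : ∀ p ∈ ps, p.2 ≠ []) :
    ∀ (s k' : List Char), (∀ c ∈ k', ∀ p ∈ ps, c ∉ p.2.take 1) → k' <+: pvScan ps s → k' <+: s := by
  intro s
  induction s with
  | nil =>
    intro k' _ h
    rw [pvScan_nil] at h
    simpa using h
  | cons c t ih =>
    intro k' hd h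
    cases hm : pvFindMatch ps (c :: t) with
    | some pr =>
      obtain ⟨k, v⟩ := pr
      rw [pvScan_cons_some hm] at h
      cases k' with
      | nil => exact List.nil_prefix
      | cons a k'' =>
        obtain ⟨hmem, -, -⟩ := pvFindMatch_mem hm
        cases hvv : v with
        | nil => exact absurd hvv (hv _ hmem)
        | cons b v'' =>
          rw [hvv] at h
          have hab : a = b := (List.cons_prefix_cons.mp h).1
          have hmem2 : a ∈ v.take 1 := by rw [hvv, hab]; simp
          exact absurd hmem2 (hd a List.mem_cons_self (k, v) hmem)
    | none =>
      rw [pvScan_cons_none hm] at h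
      cases k' with
      | nil => exact List.nil_prefix
      | cons a k'' =>
        obtain ⟨hac, h2⟩ := List.cons_prefix_cons.mp h
        subst hac
        have := ih k'' (fun c hc => hd c (List.mem_cons_of_mem _ hc)) h2
        exact List.cons_prefix_cons.mpr ⟨rfl, this⟩

theorem pvScan_copy {ps : List (List Char × List Char)} :
    ∀ (u s : List Char), (∀ m, m < u.length → pvFindMatch ps (u.drop m ++ s) = none) →
      pvScan ps (u ++ s) = u ++ pvScan ps s := by
  intro u
  induction u with
  | nil => intro s _; simp
  | cons a u' ih =>
    intro s h
    have h0 : pvFindMatch ps (a :: (u' ++ s)) = none := by simpa using h 0 (by simp)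
    rw [List.cons_append, pvScan_cons_none h0,
        ih s (fun m hm => by simpa using h (m + 1) (by simpa using hm))]
    simp

theorem pvNoPrefixAppend {a u : List Char} (rest : List Char)
    (h1 : ¬ a <+: u) (h2 : ¬ u <+: a) : ¬ a <+: (u ++ rest) := by
  intro h
  by_cases hl : a.length ≤ u.length
  · exact h1 ((List.isPrefix_append_of_length hl).mp h)
  · obtain ⟨r, hr⟩ := h
    apply h2
    have htk : u = a.take u.length := by
      have hh : (u ++ rest).take u.length = u := List.take_left
      rw [← hr, List.take_append_of_le_length (by omega)] at hh
      exact hh.symm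
    exact htk ▸ List.take_prefix _ _

-- the heart: replacing key k in the output of a scan with keys ps = scanning with keys ps ++ [(k, v)],
-- provided k is disjoint from the replacement texts and no key of ps overlaps a proper suffix of k
theorem pvStage (ps : List (List Char × List Char)) (k v : List Char)
    (hk : k ≠ [])
    (H2a : ∀ p ∈ ps, ∀ c ∈ p.2, c ∉ k.take 1)
    (H2b : ∀ p ∈ ps, ∀ c ∈ k, c ∉ p.2.take 1)
    (H3 : ∀ m, m < k.length → 0 < m → ∀ p ∈ ps, ¬ p.1 <+: k.drop m ∧ ¬ k.drop m <+: p.1)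
    (H4 : ∀ p ∈ ps, p.2 ≠ []) :
    ∀ s, pvRepl k v (pvScan ps s) = pvScan (ps ++ [(k, v)]) s := by
  suffices h : ∀ n (s : List Char), s.length ≤ n →
      pvRepl k v (pvScan ps s) = pvScan (ps ++ [(k, v)]) s from
    fun s => h s.length s le_rfl
  intro n
  induction n with
  | zero =>
    intro s hs
    have : s = [] := by cases s <;> simp_all
    subst this
    rw [pvScan_nil, pvScan_nil, pvRepl]
  | succ n ih =>
    intro s hs
    cases s with
    | nil => rw [pvScan_nil, pvScan_nil, pvRepl]
    | cons c t =>
      cases hm : pvFindMatch ps (c :: t) with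
      | some pr =>
        obtain ⟨k', v'⟩ := pr
        obtain ⟨hmem, hk', -⟩ := pvFindMatch_mem hm
        rw [pvScan_cons_some hm, pvScan_cons_some (pvFindMatch_append_some hm),
            pvRepl_skip v (H2a _ hmem) _]
        congr 1
        apply ih
        have : 0 < k'.length := by cases k' <;> simp_all
        simp only [List.length_drop, List.length_cons]
        simp only [List.length_cons] at hs
        omega
      | none =>
        by_cases hp : k <+: (c :: t)
        · obtain ⟨rest, hrest⟩ := hp
          have hcopy : pvScan ps (c :: t) = k ++ pvScan ps rest := by
            rw [← hrest]
            apply pvScan_copy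
            intro m hm'
            rcases Nat.eq_zero_or_pos m with h0 | h0
            · subst h0; simpa [hrest] using hm
            · rw [pvFindMatch_none_iff]
              intro p hpmem
              exact Or.inr (pvNoPrefixAppend rest (H3 m hm' h0 p hpmem).1 (H3 m hm' h0 p hpmem).2)
          rw [hcopy, pvRepl_pos v hk (List.prefix_append k _) (by cases k <;> simp_all),
              List.drop_left]
          have hfm2 : pvFindMatch (ps ++ [(k, v)]) (c :: t) = some (k, v) := by
            have hcond : (!k.isEmpty && k.isPrefixOf (c :: t)) = true := by
              simp only [Bool.and_eq_true, Bool.not_eq_true']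
              exact ⟨by simpa using hk, List.isPrefixOf_iff_prefix.mpr ⟨rest, hrest⟩⟩
            rw [pvFindMatch_append_none hm]
            simp only [pvFindMatch]
            rw [if_pos hcond]
          rw [pvScan_cons_some hfm2]
          congr 1
          · have hdr : (c :: t).drop k.length = rest := by rw [← hrest, List.drop_left]
            rw [hdr]
            apply ih
            have hkl : 0 < k.length := by cases k <;> simp_all
            have hlen := congrArg List.length hrest
            simp only [List.length_append, List.length_cons] at hlen
            simp only [List.length_cons] at hs
            omega
        · rw [pvScan_cons_none hm]
          have hnp : ¬ k <+: (c :: pvScan ps t) := by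
            intro hcon
            apply hp
            apply pvScan_prefix_rev H4 (c :: t) k
            · intro c' hc' p hp'
              exact H2b p hp' c' hc'
            · rw [pvScan_cons_none hm]
              exact hcon
          rw [pvRepl_neg v hnp]
          have hfm2 : pvFindMatch (ps ++ [(k, v)]) (c :: t) = none := by
            have hcond : ¬ (!k.isEmpty && k.isPrefixOf (c :: t)) = true := by
              simp only [Bool.and_eq_true, Bool.not_eq_true']
              rintro ⟨-, hpp⟩
              exact hp (List.isPrefixOf_iff_prefix.mp hpp)
            rw [pvFindMatch_append_none hm]
            simp only [pvFindMatch]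
            rw [if_neg hcond]
          rw [pvScan_cons_none hfm2]
          congr 1
          apply ih
          simp only [List.length_cons] at hs
          omega


-- Bool-level checkers for pvStage's side conditions (kept shallow so `decide` evaluates them cheaply)
def pvOverlapFree (k : List Char) (ps : List (List Char × List Char)) : Bool :=
  (List.range k.length).all fun m =>
    m == 0 || ps.all fun p => !(p.1.isPrefixOf (k.drop m)) && !((k.drop m).isPrefixOf p.1)

theorem pvOverlapFree_spec {k : List Char} {ps : List (List Char × List Char)}
    (h : pvOverlapFree k ps = true) :
    ∀ m, m < k.length → 0 < m → ∀ p ∈ ps, ¬ p.1 <+: k.drop m ∧ ¬ k.drop m <+: p.1 := by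
  intro m hm hpos p hp
  have h1 := List.all_eq_true.mp h m (List.mem_range.mpr hm)
  simp only [Bool.or_eq_true, beq_iff_eq] at h1
  rcases h1 with h1 | h1
  · omega
  · have h2 := List.all_eq_true.mp h1 p hp
    simp only [Bool.and_eq_true, Bool.not_eq_true'] at h2
    constructor
    · intro hc
      rw [List.isPrefixOf_iff_prefix.mpr hc] at h2
      exact absurd h2.1 (by simp)
    · intro hc
      rw [List.isPrefixOf_iff_prefix.mpr hc] at h2
      exact absurd h2.2 (by simp)

def pvSep (k : List Char) (ps : List (List Char × List Char)) : Bool :=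
  ps.all fun p =>
    (p.2.all fun c => !((k.take 1).contains c)) && (k.all fun c => !((p.2.take 1).contains c))

theorem pvSep_spec1 {k : List Char} {ps : List (List Char × List Char)}
    (h : pvSep k ps = true) : ∀ p ∈ ps, ∀ c ∈ p.2, c ∉ k.take 1 := by
  intro p hp c hc
  have h1 := (Bool.and_eq_true .. ▸ List.all_eq_true.mp h p hp).1
  have h2 := List.all_eq_true.mp h1 c hc
  simpa using h2

theorem pvSep_spec2 {k : List Char} {ps : List (List Char × List Char)}
    (h : pvSep k ps = true) : ∀ p ∈ ps, ∀ c ∈ k, c ∉ p.2.take 1 := by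
  intro p hp c hc
  have h1 := (Bool.and_eq_true .. ▸ List.all_eq_true.mp h p hp).2
  have h2 := List.all_eq_true.mp h1 c hc
  simpa using h2

def pvValsNonempty (ps : List (List Char × List Char)) : Bool :=
  ps.all fun p => !p.2.isEmpty

theorem pvValsNonempty_spec {ps : List (List Char × List Char)}
    (h : pvValsNonempty ps = true) : ∀ p ∈ ps, p.2 ≠ [] := by
  intro p hp
  have h1 := List.all_eq_true.mp h p hp
  simpa using h1

-- the guarded step of A's loop is just str.replace (the parenthesis branch is dead: no key ends with "(")
theorem pvStepA (s k v : String) (hk : k.toList ≠ [])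
    (hpar : PySem.Str.endswith k "(" = false) :
    (if PySem.Str.isIn k s then
       if PySem.Str.endswith k "(" && !(PySem.Str.endswith v "(") then
         PySem.Str.replace s k (v ++ "(")
       else PySem.Str.replace s k v
     else s) = PySem.Str.replace s k v := by
  rw [hpar]
  simp only [Bool.false_and, Bool.false_eq_true, if_false]
  by_cases hin : PySem.Str.isIn k s = true
  · rw [if_pos hin]
  · rw [if_neg (by simpa using hin)]
    have hninf : ¬ k.toList <:+: s.toList := by
      rw [← PySem.Str.isIn_iff_infix]
      simpa using hin
    unfold PySem.Str.replace
    rw [pvReplace_eq _ _ _ hk, pvRepl_not_infix _ hk _ hninf, String.ofList_toList]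

theorem pvA_toList (expr : String) :
    (convert_polars_to_sql_expr_py expr).toList =
      pvRepl "current_date()".toList "CURRENT_DATE".toList
        (pvRepl "current_timestamp()".toList "CURRENT_TIMESTAMP".toList
          (pvRepl "extract('epoch'".toList "EPOCH(".toList
            (pvRepl "extract('dayofweek'".toList "DAYOFWEEK(".toList
              (pvRepl "extract('minute'".toList "MINUTE(".toList
                (pvRepl "extract('hour'".toList "HOUR(".toList
                  (pvRepl "extract('date'".toList "DATE(".toList expr.toList)))))) := by
  unfold convert_polars_to_sql_expr_py pvConversionsA
  simp only [List.foldl]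
  rw [pvStepA _ _ _ (by decide) (by decide), pvStepA _ _ _ (by decide) (by decide),
      pvStepA _ _ _ (by decide) (by decide), pvStepA _ _ _ (by decide) (by decide),
      pvStepA _ _ _ (by decide) (by decide), pvStepA _ _ _ (by decide) (by decide),
      pvStepA _ _ _ (by decide) (by decide)]
  simp only [PySem.Str.replace, String.toList_ofList]
  rw [pvReplace_eq _ _ _ (by decide), pvReplace_eq _ _ _ (by decide),
      pvReplace_eq _ _ _ (by decide), pvReplace_eq _ _ _ (by decide),
      pvReplace_eq _ _ _ (by decide), pvReplace_eq _ _ _ (by decide),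
      pvReplace_eq _ _ _ (by decide)]

theorem pvAB_toList (expr : String) :
    (convert_polars_to_sql_expr_py expr).toList = pvScan pvConversionsB expr.toList := by
  rw [pvA_toList]
  conv_lhs => rw [← pvScan_empty expr.toList]
  rw [pvStage ([] : List (List Char × List Char)) _ _ (by decide) (pvSep_spec1 (by decide)) (pvSep_spec2 (by decide)) (pvOverlapFree_spec (by decide)) (pvValsNonempty_spec (by decide))]
  simp only [List.nil_append]
  rw [pvStage [("extract('date'".toList, "DATE(".toList)] _ _ (by decide) (pvSep_spec1 (by decide)) (pvSep_spec2 (by decide)) (pvOverlapFree_spec (by decide)) (pvValsNonempty_spec (by decide))]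
  simp only [List.cons_append, List.nil_append]
  rw [pvStage [("extract('date'".toList, "DATE(".toList),
       ("extract('hour'".toList, "HOUR(".toList)] _ _ (by decide) (pvSep_spec1 (by decide)) (pvSep_spec2 (by decide)) (pvOverlapFree_spec (by decide)) (pvValsNonempty_spec (by decide))]
  simp only [List.cons_append, List.nil_append]
  rw [pvStage [("extract('date'".toList, "DATE(".toList),
       ("extract('hour'".toList, "HOUR(".toList),
       ("extract('minute'".toList, "MINUTE(".toList)] _ _ (by decide) (pvSep_spec1 (by decide)) (pvSep_spec2 (by decide)) (pvOverlapFree_spec (by decide)) (pvValsNonempty_spec (by decide))]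
  simp only [List.cons_append, List.nil_append]
  rw [pvStage [("extract('date'".toList, "DATE(".toList),
       ("extract('hour'".toList, "HOUR(".toList),
       ("extract('minute'".toList, "MINUTE(".toList),
       ("extract('dayofweek'".toList, "DAYOFWEEK(".toList)] _ _ (by decide) (pvSep_spec1 (by decide)) (pvSep_spec2 (by decide)) (pvOverlapFree_spec (by decide)) (pvValsNonempty_spec (by decide))]
  simp only [List.cons_append, List.nil_append]
  rw [pvStage [("extract('date'".toList, "DATE(".toList),
       ("extract('hour'".toList, "HOUR(".toList),
       ("extract('minute'".toList, "MINUTE(".toList),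
       ("extract('dayofweek'".toList, "DAYOFWEEK(".toList),
       ("extract('epoch'".toList, "EPOCH(".toList)] _ _ (by decide) (pvSep_spec1 (by decide)) (pvSep_spec2 (by decide)) (pvOverlapFree_spec (by decide)) (pvValsNonempty_spec (by decide))]
  simp only [List.cons_append, List.nil_append]
  rw [pvStage [("extract('date'".toList, "DATE(".toList),
       ("extract('hour'".toList, "HOUR(".toList),
       ("extract('minute'".toList, "MINUTE(".toList),
       ("extract('dayofweek'".toList, "DAYOFWEEK(".toList),
       ("extract('epoch'".toList, "EPOCH(".toList),
       ("current_timestamp()".toList, "CURRENT_TIMESTAMP".toList)] _ _ (by decide) (pvSep_spec1 (by decide)) (pvSep_spec2 (by decide)) (pvOverlapFree_spec (by decide)) (pvValsNonempty_spec (by decide))]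
  simp only [List.cons_append, List.nil_append]
  rfl

-- ===== VERDICT (by name: the statement is the Claim_ definition above) =====
theorem convert_polars_to_sql_expr_py_spec : Claim_equal_convert_polars_to_sql_expr_py := by
  intro expr _
  unfold Spec_convert_polars_to_sql_expr_py convert_polars_to_sql_expr_py_alt
  have h := congrArg String.ofList (pvAB_toList expr)
  rwa [String.ofList_toList] at h
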